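-- pv_equiv track=rewrite | github.com/Tech-Liao/python_learn | Bwu_Oj/6.py | func
-- ===== SOURCE A (Python) =====
-- def func(num):
--     element = []
--     if num == 0:
--         element = [0]
--         return element
--     while num > 0:
--         element.append(num % 10)
--         num //= 10
--
--     return element
-- ===== SOURCE B (Python) =====
-- def func(num):
--     if num < 0:
--         return []
--     return [int(c) for c in str(num)][::-1]
-- ===== Notes on version B (the rewrite author's own statement) =====
-- stated objective: idiomatic
-- what changed: B replaces A's mod/div accumulation loop with converting the number to its decimal string, parsing each character back to an int, and reversing the result.
import Mathlib
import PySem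

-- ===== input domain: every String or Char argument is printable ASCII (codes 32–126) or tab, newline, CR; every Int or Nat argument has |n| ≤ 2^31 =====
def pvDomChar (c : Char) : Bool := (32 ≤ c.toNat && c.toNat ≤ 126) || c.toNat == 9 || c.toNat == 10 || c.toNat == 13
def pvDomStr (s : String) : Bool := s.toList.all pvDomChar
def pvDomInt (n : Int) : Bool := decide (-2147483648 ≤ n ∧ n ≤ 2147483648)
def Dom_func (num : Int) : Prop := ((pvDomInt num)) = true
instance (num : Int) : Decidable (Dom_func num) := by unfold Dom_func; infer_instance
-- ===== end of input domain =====

-- B replaces the arithmetic mod/div digit loop with string conversion: parse the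
-- digits of str(num) and reverse them (objective: idiomatic; no speed claim).

-- ===== PORT A =====
-- the while loop: append num % 10, then num //= 10, while num > 0
def funcLoop (num : Int) (acc : List Int) : List Int :=
  if num > 0 then
    funcLoop (PySem.Int.floordiv num 10) (acc ++ [PySem.Int.mod num 10])
  else acc
termination_by num.toNat
decreasing_by
  simp only [PySem.Int.floordiv]
  have h2 : Int.fdiv num 10 = num / 10 - if 0 ≤ (10:Int) ∨ (10:Int) ∣ num then 0 else 1 :=
    Int.fdiv_eq_ediv
  simp at h2
  omega

def func (num : Int) : List Int :=
  if num == 0 then [0]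
  else funcLoop num []

-- ===== PORT B =====
def func_alt (num : Int) : List Int :=
  if num < 0 then []
  else
    (PySem.List.slice?
      (((PySem.Int.toStr num).toList).map
        (fun c => (PySem.Int.ofStr? (String.ofList [c])).getD 0))
      none none (-1)).getD []

-- ===== PRECONDITION & SPEC =====
def Spec_func (num : Int) (out : List Int) : Prop := out = func_alt num
instance (num : Int) (out : List Int) : Decidable (Spec_func num out) := by unfold Spec_func; infer_instance

-- ===== CLAIM (what is proved, stated in full; the proofs are below) =====
def Claim_equal_func : Prop := ∀ (num : Int), Dom_func num → Spec_func num (func num)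

-- ===== LEMMAS AND PROOFS =====

-- A's loop produces the little-endian base-10 digits (Nat.digits) appended to acc.
theorem funcLoop_digits (m : Nat) : ∀ (acc : List Int),
    funcLoop (m : Int) acc = acc ++ (Nat.digits 10 m).map (fun d => Int.ofNat d) := by
  induction m using Nat.strong_induction_on with
  | _ m ih =>
    intro acc
    rw [funcLoop]
    by_cases h0 : m = 0
    · subst h0; simp
    · have hm : 0 < m := Nat.pos_of_ne_zero h0
      have hpos : (0:Int) < (m:Int) := by exact_mod_cast hm
      rw [if_pos hpos]
      have hfd : PySem.Int.floordiv (m : Int) 10 = ((m / 10 : Nat) : Int) := by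
        simp only [PySem.Int.floordiv]
        have h2 : Int.fdiv (m:Int) 10 = (m:Int) / 10 - if 0 ≤ (10:Int) ∨ (10:Int) ∣ (m:Int) then 0 else 1 :=
          Int.fdiv_eq_ediv
        simp at h2
        rw [h2]
        push_cast
        ring
      have hmod : PySem.Int.mod (m : Int) 10 = ((m % 10 : Nat) : Int) := by
        simp only [PySem.Int.mod]
        have h3 : Int.fmod (m:Int) 10 = (m:Int) % 10 + if 0 ≤ (10:Int) ∨ (10:Int) ∣ (m:Int) then 0 else 10 := Int.fmod_eq_emod
        simp at h3
        omega
      rw [hfd, hmod, ih (m / 10) (Nat.div_lt_self hm (by norm_num)),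
          Nat.digits_def' (by norm_num : 1 < 10) hm]
      simp

-- Core's printing routine produces the big-endian digit characters.
theorem toDigitsCore_eq : ∀ (fuel n : Nat) (ds : List Char), n < fuel →
    Nat.toDigitsCore 10 fuel n ds =
      (if n = 0 then ['0'] else ((Nat.digits 10 n).reverse.map Nat.digitChar)) ++ ds := by
  intro fuel
  induction fuel with
  | zero => intro n ds h; omega
  | succ f ih =>
    intro n ds h
    rw [Nat.toDigitsCore]
    by_cases h0 : n / 10 = 0
    · rw [if_pos h0]
      by_cases hn : n = 0
      · subst hn; simp [Nat.digitChar]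
      · have hlt : n < 10 := by omega
        rw [if_neg hn, Nat.digits_def' (by norm_num : 1 < 10) (Nat.pos_of_ne_zero hn), h0]
        simp
    · rw [if_neg h0]
      have hn : n ≠ 0 := by intro h'; subst h'; simp at h0
      have hd : n / 10 < f := by
        have := Nat.div_lt_self (Nat.pos_of_ne_zero hn) (by norm_num : 1 < 10)
        omega
      rw [ih (n / 10) _ hd, if_neg h0,
          Nat.digits_def' (by norm_num : 1 < 10) (Nat.pos_of_ne_zero hn)]
      rw [if_neg hn]
      simp

-- int(str-digit-char) round-trips on the ten digit characters.
theorem parse_digitChar : ∀ d : Nat, d < 10 →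
    (PySem.Int.ofStr? (String.ofList [Nat.digitChar d])).getD 0 = (d : Int) := by decide

theorem func_alt_pos (num : Int) (h : 0 < num) :
    func_alt num = (Nat.digits 10 num.toNat).map (fun d => Int.ofNat d) := by
  unfold func_alt
  rw [if_neg (by omega)]
  rw [PySem.List.slice?_none_none_neg_one, Option.getD_some]
  rw [PySem.Int.toList_toStr]
  have hnn : ¬ (num < 0) := by omega
  have htc : PySem.Int.toChars num = Nat.toDigits 10 num.toNat := by
    simp [PySem.Int.toChars, hnn]
  rw [htc, Nat.toDigits,
      toDigitsCore_eq (num.toNat + 1) num.toNat [] (Nat.lt_succ_self _),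
      if_neg (by omega : ¬ num.toNat = 0)]
  simp only [List.append_nil, List.map_reverse, List.reverse_reverse, List.map_map]
  refine List.map_congr_left ?_
  intro d hd
  exact parse_digitChar d (Nat.digits_lt_base (by norm_num) hd)

-- ===== VERDICT (by name: the statement is the Claim_ definition above) =====
theorem func_spec : Claim_equal_func := by
  intro num _
  unfold Spec_func func
  rcases lt_trichotomy num 0 with h | h | h
  · rw [if_neg (by simp only [beq_iff_eq]; omega : ¬ (num == 0) = true), funcLoop, if_neg (by omega)]
    unfold func_alt
    rw [if_pos h]
  · subst h; decide
  · rw [if_neg (by simp only [beq_iff_eq]; omega : ¬ (num == 0) = true), func_alt_pos num h]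
    have := funcLoop_digits num.toNat []
    rw [Int.toNat_of_nonneg (by omega)] at this
    simpa using this
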